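-- pv_equiv track=rewrite | github.com/drezi29/fifteen | src/Jigsaw.py | correctSolution
-- ===== SOURCE A (Python) =====
-- def correctSolution(w, h):
--     solution = []
--     value = 1
--     for x in range(h*w):
--         solution.append(value)
--         value = value + 1
--         if(x == (h*w)-1):
--             solution[x] = 0
--     return solution
-- ===== SOURCE B (Python) =====
-- def correctSolution(w, h):
--     n = h * w
--     if n <= 0:
--         return []
--     out = [0]
--     for v in range(n - 1, 0, -1):
--         out.append(v)
--     out.reverse()
--     return out
-- ===== Notes on version B (the rewrite author's own statement) =====
-- stated objective: alternative
-- what changed: Builds the result back-to-front: starts from the trailing [0], appends the tile values in descending order n-1..1, and reverses once at the end, instead of A's forward append loop patched to 0 at the last index.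
import Mathlib
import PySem

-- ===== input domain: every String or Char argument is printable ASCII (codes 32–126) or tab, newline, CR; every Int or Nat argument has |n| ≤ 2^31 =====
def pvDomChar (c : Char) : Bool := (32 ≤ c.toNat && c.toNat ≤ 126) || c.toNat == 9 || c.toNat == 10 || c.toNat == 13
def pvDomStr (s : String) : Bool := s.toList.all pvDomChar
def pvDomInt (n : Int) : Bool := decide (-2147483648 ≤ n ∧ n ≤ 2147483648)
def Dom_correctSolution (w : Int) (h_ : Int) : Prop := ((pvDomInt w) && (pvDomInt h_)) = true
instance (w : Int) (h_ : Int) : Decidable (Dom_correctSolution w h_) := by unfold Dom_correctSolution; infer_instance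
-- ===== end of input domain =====

-- B builds the goal list back-to-front (start from [0], append n-1..1 descending, reverse once) instead of A's forward append-and-patch loop; objective: alternative.

-- ===== PORT A =====
-- one loop iteration: append value, bump it, patch solution[x] to 0 on the last index
def pvStepA (n : Int) (st : List Int × Int) (x : Int) : List Int × Int :=
  let sol := st.1 ++ [st.2]
  let v := st.2 + 1
  if x == n - 1 then (PySem.List.pySetD sol x 0, v) else (sol, v)

def correctSolution (w : Int) (h_ : Int) : List Int :=
  ((PySem.List.pyRange 0 (h_ * w) 1).foldl (pvStepA (h_ * w)) ([], 1)).1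

-- ===== PORT B =====
def correctSolution_alt (w : Int) (h_ : Int) : List Int :=
  let n := h_ * w
  if n ≤ 0 then []
  else ((PySem.List.pyRange (n - 1) 0 (-1)).foldl (fun out v => out ++ [v]) [0]).reverse

-- ===== PRECONDITION & SPEC =====
def Spec_correctSolution (w : Int) (h_ : Int) (out : List Int) : Prop := out = correctSolution_alt w h_
instance (w : Int) (h_ : Int) (out : List Int) : Decidable (Spec_correctSolution w h_ out) := by unfold Spec_correctSolution; infer_instance

-- ===== CLAIM (what is proved, stated in full; the proofs are below) =====
def Claim_equal_correctSolution : Prop := ∀ (w : Int) (h_ : Int), Dom_correctSolution w h_ → Spec_correctSolution w h_ (correctSolution w h_)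

-- ===== LEMMAS AND PROOFS =====

-- folding append-singleton is concatenation
theorem pvFoldAppend (l : List Int) (init : List Int) :
    l.foldl (fun out v => out ++ [v]) init = init ++ l := by
  induction l generalizing init with
  | nil => simp
  | cons a t ih => simp [ih]

-- B's value in the positive case, in closed form
theorem pvAltPos (w h_ : Int) (hn : 0 < h_ * w) :
    correctSolution_alt w h_ = PySem.List.pyRange 1 (h_ * w) 1 ++ [0] := by
  unfold correctSolution_alt
  rw [if_neg (by omega)]
  rw [pvFoldAppend]
  rw [PySem.List.pyRange_neg_one_eq_reverse]
  simp [show h_ * w - 1 + 1 = h_ * w by ring]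

-- before the last index the patch branch never fires, so A's loop is a plain running append
theorem pvFoldA_no_patch (n : Int) (l : List Int) (sol : List Int) (v : Int)
    (h : ∀ x ∈ l, x ≠ n - 1) :
    l.foldl (pvStepA n) (sol, v) =
      (sol ++ PySem.List.pyRange v (v + l.length) 1, v + l.length) := by
  induction l generalizing sol v with
  | nil => simp [PySem.List.pyRange_one_eq_nil (le_refl v)]
  | cons a t ih =>
    have ha : a ≠ n - 1 := h a (List.mem_cons_self)
    simp only [List.foldl_cons, pvStepA, beq_iff_eq, if_neg ha]
    rw [ih _ _ (fun x hx => h x (List.mem_cons_of_mem _ hx))]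
    have hcons : PySem.List.pyRange v (v + (a :: t).length) 1
        = v :: PySem.List.pyRange (v + 1) (v + (a :: t).length) 1 :=
      PySem.List.pyRange_one_cons (by simp)
    have harg : v + ((a :: t).length : Int) = v + 1 + (t.length : Int) := by
      simp only [List.length_cons]
      push_cast
      ring
    rw [hcons, harg]
    simp

-- A's value in the positive case, in the same closed form
theorem pvMainPos (n : Int) (hn : 0 < n) :
    ((PySem.List.pyRange 0 n 1).foldl (pvStepA n) ([], 1)).1 =
      PySem.List.pyRange 1 n 1 ++ [0] := by
  have h1 : (0 : Int) ≤ n - 1 := by omega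
  have hsplit := PySem.List.pyRange_one_append 0 (n - 1) n h1 (by omega)
  have hlast : PySem.List.pyRange (n - 1) n 1 = [n - 1] := by
    have := PySem.List.pyRange_one_singleton (n - 1)
    simpa [show n - 1 + 1 = n by ring] using this
  rw [hsplit, hlast, List.foldl_append]
  have hno : ∀ x ∈ PySem.List.pyRange 0 (n - 1) 1, x ≠ n - 1 := by
    intro x hx
    have := (PySem.List.mem_pyRange_one).1 hx
    omega
  rw [pvFoldA_no_patch n _ [] 1 hno]
  have hlen : ((PySem.List.pyRange 0 (n - 1) 1).length : Int) = n - 1 := by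
    have := PySem.List.length_pyRange_one 0 (n - 1)
    omega
  rw [show (1 : Int) + ((PySem.List.pyRange 0 (n - 1) 1).length : Int) = n by omega]
  simp only [List.foldl_cons, List.foldl_nil, pvStepA, beq_self_eq_true, if_pos, List.nil_append]
  have hlen2 : (PySem.List.pyRange 1 n 1).length = (n - 1).toNat := by
    simpa using PySem.List.length_pyRange_one 1 n
  have hidx : ((n - 1 : Int)) = (((n - 1).toNat : Nat) : Int) := by omega
  rw [hidx, PySem.List.pySetD_natCast]
  rw [List.set_append_right _ _ (by omega)]
  simp [hlen2]

-- ===== VERDICT (by name: the statement is the Claim_ definition above) =====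
theorem correctSolution_spec : Claim_equal_correctSolution := by
  intro w h_ _
  unfold Spec_correctSolution
  by_cases hn : h_ * w ≤ 0
  · unfold correctSolution correctSolution_alt
    simp [PySem.List.pyRange_one_eq_nil hn, hn]
  · rw [pvAltPos w h_ (by omega)]
    unfold correctSolution
    exact pvMainPos (h_ * w) (by omega)
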